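-- pv_equiv track=rewrite | github.com/cirosantilli/project-euler-solvers | solvers/302.py | factorize_small
-- ===== SOURCE A (Python) =====
-- def factorize_small(x: int, spf: list[int]) -> list[tuple[int, int]]:
--     """Factorize x <= len(spf)-1 using smallest prime factor table."""
--     out = []
--     while x > 1:
--         p = spf[x]
--         e = 0
--         while x % p == 0:
--             x //= p
--             e += 1
--         out.append((p, e))
--     return out
-- ===== SOURCE B (Python) =====
-- def factorize_small(x: int, spf: list[int]) -> list[tuple[int, int]]:
--     """Factorize x <= len(spf)-1 using smallest prime factor table.
--
--     Single flat loop with a counting dict: one table lookup and one division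
--     per iteration, tallying counts[p] += 1; no nested exponent-counting loop.
--     Correct because the smallest prime factor is non-decreasing as factors are
--     divided out, so dict insertion order is the increasing-prime order.
--     """
--     counts = {}
--     while x > 1:
--         p = spf[x]
--         counts[p] = counts.get(p, 0) + 1
--         x //= p
--     return list(counts.items())
-- ===== Notes on version B (the rewrite author's own statement) =====
-- stated objective: simpler
-- what changed: Replaces A's nested exponent-counting loop (inner while per prime, appending (p,e) tuples) by a single flat loop that does one lookup and one division per iteration and tallies counts[p] += 1 in a dict, returning list(counts.items()); insertion order equals the increasing-prime order because the smallest prime factor stream is non-decreasing. Pre_ restricts to the documented domain (spf a genuine smallest-prime-factor table, x < len(spf)), outside which A usually diverges or raises, and the rare invalid tables on which A still returns (e.g. negative entries) are accidental.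
-- outside the precondition, e.g. on factorize_small(4, [0, 0, 0, 0, -2]): A returns [(-2, 2)], B returns [(-2, 1)]
import Mathlib
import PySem

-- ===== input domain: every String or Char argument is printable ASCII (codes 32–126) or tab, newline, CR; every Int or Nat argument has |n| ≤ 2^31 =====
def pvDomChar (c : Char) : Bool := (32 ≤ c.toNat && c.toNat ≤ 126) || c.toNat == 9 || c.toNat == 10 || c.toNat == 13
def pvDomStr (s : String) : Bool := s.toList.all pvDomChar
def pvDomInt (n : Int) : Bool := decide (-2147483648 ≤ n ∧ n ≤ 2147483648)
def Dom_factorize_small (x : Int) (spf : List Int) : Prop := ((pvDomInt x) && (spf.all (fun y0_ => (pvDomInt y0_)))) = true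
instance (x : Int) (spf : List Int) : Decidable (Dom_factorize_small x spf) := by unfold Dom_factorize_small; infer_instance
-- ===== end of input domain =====

-- B replaces A's nested exponent-counting loop by a single flat loop that tallies
-- counts[p] += 1 in a dict and returns list(counts.items()): simpler control flow.

-- ===== PORT A =====
-- inner 'while x % p == 0: x //= p; e += 1' (fuel only makes the loop total; under Pre_ it never runs out)
def pvDivLoop (fuel : Nat) (x p e : Int) : Int × Int :=
  match fuel with
  | 0 => (x, e)
  | f + 1 =>
    if PySem.Int.mod x p = 0 then pvDivLoop f (PySem.Int.floordiv x p) p (e + 1)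
    else (x, e)

-- outer 'while x > 1' loop of A (p = spf[x]; none = IndexError, unreachable under Pre_)
def pvLoopA (fuel : Nat) (x : Int) (spf : List Int) (out : List (Int × Int)) : List (Int × Int) :=
  match fuel with
  | 0 => out
  | f + 1 =>
    if 1 < x then
      match PySem.List.pyGet? spf x with
      | some p =>
        let xe := pvDivLoop f x p 0
        pvLoopA f xe.1 spf (out ++ [(p, xe.2)])
      | none => out
    else out

def factorize_small (x : Int) (spf : List Int) : List (Int × Int) :=
  pvLoopA (x.toNat + 1) x spf []

-- ===== PORT B =====
-- B's single flat 'while x > 1' loop: 'p = spf[x]; counts[p] = counts.get(p, 0) + 1; x //= p',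
-- then 'return list(counts.items())'
def pvLoopB (fuel : Nat) (x : Int) (spf : List Int) (counts : PySem.Dict Int Int) : List (Int × Int) :=
  match fuel with
  | 0 => counts.items
  | f + 1 =>
    if 1 < x then
      match PySem.List.pyGet? spf x with
      | some p => pvLoopB f (PySem.Int.floordiv x p) spf (counts.insert p (counts.getD p 0 + 1))
      | none => counts.items
    else counts.items

def factorize_small_alt (x : Int) (spf : List Int) : List (Int × Int) :=
  pvLoopB (x.toNat + 1) x spf PySem.Dict.empty

-- ===== PRECONDITION & SPEC =====
-- spf is a genuine smallest-prime-factor table: spf[i] is the least divisor ≥ 2 of i, for 2 ≤ i < len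
def ValidSPF (spf : List Int) : Prop :=
  ∀ i ∈ List.range spf.length, 2 ≤ i →
    2 ≤ spf.getD i 0 ∧ spf.getD i 0 ∣ (i : Int) ∧
      ∀ q ∈ List.range i, 2 ≤ q → (q : Int) < spf.getD i 0 → ¬ ((q : Int) ∣ (i : Int))

-- Pre_ is the documented domain of A ('factorize x <= len(spf)-1 using smallest prime factor
-- table'): x ≤ 1, or 2 ≤ x < len spf with spf a valid SPF table.  Outside it A usually
-- diverges (spf[x] not dividing x) or raises; on the rare invalid tables where A still
-- returns, its value is an accident of the nested loop and is excluded.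
def Pre_factorize_small (x : Int) (spf : List Int) : Prop :=
  x ≤ 1 ∨ (2 ≤ x ∧ x < spf.length ∧ ValidSPF spf)

instance (x : Int) (spf : List Int) : Decidable (Pre_factorize_small x spf) := by
  unfold Pre_factorize_small ValidSPF; infer_instance

def pvWitness_factorize_small : Int × List Int := (4, [0, 0, 2, 3, 2])

def Spec_factorize_small (x : Int) (spf : List Int) (out : List (Int × Int)) : Prop :=
  out = factorize_small_alt x spf

instance (x : Int) (spf : List Int) (out : List (Int × Int)) :
    Decidable (Spec_factorize_small x spf out) := by unfold Spec_factorize_small; infer_instance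

-- ===== CLAIM (what is proved, stated in full; the proofs are below) =====
def Claim_equal_factorize_small : Prop :=
  ∀ (x : Int) (spf : List Int), Dom_factorize_small x spf → Pre_factorize_small x spf →
    Spec_factorize_small x spf (factorize_small x spf)

-- ===== LEMMAS AND PROOFS =====

lemma pv_nat_add_le_mul_pow (n e : Nat) (hn : 1 ≤ n) : n + e ≤ n * 2 ^ e := by
  induction e with
  | zero => simp
  | succ e ih =>
    have : n * 2 ^ (e + 1) = 2 * (n * 2 ^ e) := by ring
    omega

-- what ValidSPF says at one integer index 2 ≤ y < len
lemma pv_spf_spec {spf : List Int} (hv : ValidSPF spf) {y : Int}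
    (h2 : 2 ≤ y) (hlen : y < spf.length) :
    PySem.List.pyGet? spf y = some (spf.getD y.toNat 0) ∧
    2 ≤ spf.getD y.toNat 0 ∧ spf.getD y.toNat 0 ∣ y ∧
      ∀ q : Int, 2 ≤ q → q < spf.getD y.toNat 0 → ¬ q ∣ y := by
  have h0 : (0:Int) ≤ y := by omega
  have hyn : y.toNat < spf.length := by omega
  have hy : (y.toNat : Int) = y := Int.toNat_of_nonneg h0
  have hget : PySem.List.pyGet? spf y = some spf[y.toNat] :=
    PySem.List.pyGet?_eq_some_getElem spf h0 (by exact_mod_cast hlen)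
  have hgd : spf.getD y.toNat 0 = spf[y.toNat] := List.getD_eq_getElem spf 0 hyn
  have hmem := hv y.toNat (List.mem_range.mpr hyn) (by omega)
  rcases hmem with ⟨hp2, hpd, hq⟩
  refine ⟨by rw [hget, hgd], hp2, by rwa [hy] at hpd, ?_⟩
  intro q hq2 hqp hdvd
  have hpd' : spf.getD y.toNat 0 ∣ y := by rwa [hy] at hpd
  have hple : spf.getD y.toNat 0 ≤ y := Int.le_of_dvd (by omega) hpd'
  have hqy : q < y := by omega
  have hqlt : q.toNat < y.toNat := by omega
  have hqmem : q.toNat ∈ List.range y.toNat := List.mem_range.mpr hqlt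
  have hqn : (q.toNat : Int) = q := Int.toNat_of_nonneg (by omega)
  exact hq q.toNat hqmem (by omega) (by rwa [hqn]) (by rw [hqn, hy]; exact hdvd)

-- A's inner loop divides out p completely
lemma pv_divLoop_spec {p : Int} (hp : 2 ≤ p) :
    ∀ (f : Nat) (x e0 : Int), 1 ≤ x → x.toNat ≤ f →
      ∃ (x' : Int) (e : Nat), pvDivLoop f x p e0 = (x', e0 + e) ∧
        x = x' * p ^ e ∧ ¬ p ∣ x' ∧ 1 ≤ x' ∧ (p ∣ x → 1 ≤ e) := by
  intro f
  induction f with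
  | zero => intro x e0 hx hf; omega
  | succ f ih =>
    intro x e0 hx hf
    by_cases hd : p ∣ x
    · have hmod : PySem.Int.mod x p = 0 := (PySem.Int.mod_eq_zero_iff_dvd x p).mpr hd
      have hfd : PySem.Int.floordiv x p = x / p :=
        PySem.Int.floordiv_eq_ediv_of_pos (by omega)
      obtain ⟨c, hc⟩ := hd
      have hc1 : 1 ≤ c := by nlinarith
      have hxp : x / p = c := by rw [hc, Int.mul_ediv_cancel_left c (by omega)]
      have hcx : c < x := by nlinarith
      have hcf : c.toNat ≤ f := by omega
      obtain ⟨x', e, heq, hxe, hnd, hx1, _⟩ := ih c (e0 + 1) hc1 hcf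
      refine ⟨x', e + 1, ?_, ?_, hnd, hx1, fun _ => by omega⟩
      · simp only [pvDivLoop, hmod, if_pos, hfd, hxp]
        rw [heq, Prod.mk.injEq]
        exact ⟨rfl, by push_cast; ring⟩
      · rw [hc, hxe]; ring
    · have hmod : ¬ PySem.Int.mod x p = 0 := fun h =>
        hd ((PySem.Int.mod_eq_zero_iff_dvd x p).mp h)
      refine ⟨x, 0, ?_, by ring, hd, hx, fun h => absurd h hd⟩
      simp [pvDivLoop, hmod]

-- get? on a literal dict whose only entry with key p is the last one
lemma pv_get?_last (out : List (Int × Int)) (p k : Int)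
    (h : ∀ q ∈ out, q.1 ≠ p) :
    (PySem.Dict.mk (out ++ [(p, k)])).get? p = some k := by
  induction out with
  | nil => simp [PySem.Dict.get?_mk_cons]
  | cons a t ih =>
    obtain ⟨a1, a2⟩ := a
    have ha : a1 ≠ p := h (a1, a2) (by simp)
    rw [List.cons_append, PySem.Dict.get?_mk_cons, if_neg (by simpa using ha)]
    exact ih (fun q hq => h q (by simp [hq]))

lemma pv_get?_fresh (out : List (Int × Int)) (p : Int)
    (h : ∀ q ∈ out, q.1 ≠ p) :
    (PySem.Dict.mk out).get? p = none := by
  induction out with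
  | nil => rfl
  | cons a t ih =>
    obtain ⟨a1, a2⟩ := a
    have ha : a1 ≠ p := h (a1, a2) (by simp)
    rw [PySem.Dict.get?_mk_cons, if_neg (by simpa using ha)]
    exact ih (fun q hq => h q (by simp [hq]))

-- 'counts[p] = counts.get(p, 0) + 1' when p is already the LAST key: bumps it in place
lemma pv_insert_last (out : List (Int × Int)) (p k : Int)
    (h : ∀ q ∈ out, q.1 ≠ p) :
    (PySem.Dict.mk (out ++ [(p, k)])).insert p
        ((PySem.Dict.mk (out ++ [(p, k)])).getD p 0 + 1) =
      PySem.Dict.mk (out ++ [(p, k + 1)]) := by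
  have hget := pv_get?_last out p k h
  have hgd : (PySem.Dict.mk (out ++ [(p, k)])).getD p 0 = k :=
    PySem.Dict.getD_of_get?_eq_some _ 0 hget
  have hcon : (PySem.Dict.mk (out ++ [(p, k)])).contains p = true := by
    rw [PySem.Dict.contains_eq_isSome_get?, hget]; rfl
  apply PySem.Dict.ext
  rw [hgd, PySem.Dict.items_insert_of_contains _ _ hcon]
  show (out ++ [(p, k)]).map _ = _
  rw [List.map_append]
  congr 1
  · have hc : ∀ q ∈ out, (if (q.1 == p) = true then (p, k + 1) else q) = id q := by
      intro q hq
      simp [show (q.1 == p) = false by simpa using h q hq]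
    rw [List.map_congr_left hc, List.map_id]
  · simp

-- 'counts[p] = counts.get(p, 0) + 1' when p is a fresh key: appends (p, 1)
lemma pv_insert_fresh (out : List (Int × Int)) (p : Int)
    (h : ∀ q ∈ out, q.1 ≠ p) :
    (PySem.Dict.mk out).insert p ((PySem.Dict.mk out).getD p 0 + 1) =
      PySem.Dict.mk (out ++ [(p, 1)]) := by
  have hget := pv_get?_fresh out p h
  have hgd : (PySem.Dict.mk out).getD p 0 = 0 :=
    PySem.Dict.getD_of_get?_eq_none _ 0 hget
  have hcon : (PySem.Dict.mk out).contains p = false := by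
    rw [PySem.Dict.contains_eq_isSome_get?, hget]; rfl
  apply PySem.Dict.ext
  rw [hgd, PySem.Dict.items_insert_of_not_contains _ _ hcon]
  norm_num

lemma pv_loopA_stop (f : Nat) (x : Int) (spf : List Int) (out : List (Int × Int))
    (hx : x ≤ 1) : pvLoopA f x spf out = out := by
  cases f with
  | zero => rfl
  | succ f => simp [pvLoopA, show ¬ 1 < x by omega]

lemma pv_loopB_stop (f : Nat) (x : Int) (spf : List Int) (d : PySem.Dict Int Int)
    (hx : x ≤ 1) : pvLoopB f x spf d = d.items := by
  cases f with
  | zero => rfl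
  | succ f => simp [pvLoopB, show ¬ 1 < x by omega]

-- B's flat loop performs one full run of the prime p (e extra divisions),
-- bumping the in-place dict entry (p, k) each time
lemma pv_loopB_run {spf : List Int} (hv : ValidSPF spf) {p : Int} (hp : 2 ≤ p) :
    ∀ (e g : Nat) (x' : Int) (out : List (Int × Int)) (k : Int),
      (∀ q ∈ out, q.1 ≠ p) →
      1 ≤ x' → ¬ p ∣ x' → e ≤ g → (x' * p ^ e : Int) < spf.length →
      (∀ q : Int, 2 ≤ q → q ∣ x' * p ^ e → p ≤ q) →
      pvLoopB g (x' * p ^ e) spf (PySem.Dict.mk (out ++ [(p, k)])) =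
        pvLoopB (g - e) x' spf (PySem.Dict.mk (out ++ [(p, k + e)])) := by
  intro e
  induction e with
  | zero => intro g x' out k _ _ _ _ _ _; norm_num
  | succ e ih =>
    intro g x' out k hout hx1 hnd heg hlen hmin
    obtain ⟨g', rfl⟩ : ∃ g', g = g' + 1 := ⟨g - 1, by omega⟩
    set y : Int := x' * p ^ (e + 1) with hy
    have hpe : (1:Int) ≤ p ^ e := one_le_pow₀ (by omega)
    have hpe1 : (1:Int) ≤ p ^ (e + 1) := one_le_pow₀ (by omega)
    have hy2 : 2 ≤ y := by
      have : p ^ (e + 1) = p * p ^ e := by ring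
      nlinarith
    have hpd : p ∣ y := ⟨x' * p ^ e, by ring⟩
    obtain ⟨hget, hP2, hPd, hPmin⟩ := pv_spf_spec hv hy2 hlen
    have hPy : spf.getD y.toNat 0 = p := by
      have h1 : spf.getD y.toNat 0 ≤ p := by
        by_contra h
        exact hPmin p hp (by omega) hpd
      have h2 : p ≤ spf.getD y.toNat 0 := hmin _ hP2 hPd
      omega
    have hfd : PySem.Int.floordiv y p = x' * p ^ e := by
      rw [PySem.Int.floordiv_eq_ediv_of_pos (by omega), hy]
      rw [show x' * p ^ (e + 1) = (x' * p ^ e) * p by ring,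
        Int.mul_ediv_cancel _ (by omega : p ≠ 0)]
    have step : pvLoopB (g' + 1) y spf (PySem.Dict.mk (out ++ [(p, k)])) =
        pvLoopB g' (x' * p ^ e) spf (PySem.Dict.mk (out ++ [(p, k + 1)])) := by
      simp only [pvLoopB, if_pos (by omega : 1 < y), hget, hPy, hfd,
        pv_insert_last out p k hout]
    rw [step, show g' + 1 - (e + 1) = g' - e from by omega,
      show (k + ((e + 1 : Nat) : Int)) = k + 1 + (e : Nat) from by push_cast; ring]
    exact ih g' x' out (k + 1) hout hx1 hnd (by omega)
      (by nlinarith [pow_le_pow_right₀ (by omega : (1:Int) ≤ p) (by omega : e ≤ e + 1)])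
      (fun q hq2 hqd => hmin q hq2 (hqd.trans ⟨p, by ring⟩))

-- main synchronisation: on a valid table the two loops agree
lemma pv_main {spf : List Int} (hv : ValidSPF spf) :
    ∀ (n : Nat) (x : Int) (f g : Nat) (out : List (Int × Int)),
      x.toNat = n → 2 ≤ x → x < spf.length → x.toNat < f → x.toNat < g →
      (∀ q ∈ out, ∀ d : Int, 2 ≤ d → d ∣ x → q.1 < d) →
      pvLoopB g x spf (PySem.Dict.mk out) = pvLoopA f x spf out := by
  intro n
  induction n using Nat.strong_induction_on with
  | _ n ih =>
    intro x f g out hn h2 hlen hf hg hlow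
    obtain ⟨f', rfl⟩ : ∃ f', f = f' + 1 := ⟨f - 1, by omega⟩
    obtain ⟨g', rfl⟩ : ∃ g', g = g' + 1 := ⟨g - 1, by omega⟩
    obtain ⟨hget, hp2, hpd, hpmin⟩ := pv_spf_spec hv h2 hlen
    set p : Int := spf.getD x.toNat 0 with hpdef
    obtain ⟨x', e, hdl, hxe, hnd, hx'1, he1⟩ :=
      pv_divLoop_spec hp2 f' x 0 (by omega) (by omega)
    have he1' : 1 ≤ e := he1 hpd
    have hmin : ∀ q : Int, 2 ≤ q → q ∣ x → p ≤ q := by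
      intro q hq2 hqd
      by_contra h
      exact hpmin q hq2 (by omega) hqd
    have hout : ∀ q ∈ out, q.1 ≠ p := by
      intro q hq
      have := hlow q hq p hp2 hpd; omega
    have hpe : (1:Int) ≤ p ^ e := one_le_pow₀ (by omega)
    have hx'le : x' * 2 ^ e ≤ x := by
      rw [hxe]
      have : (2:Int) ^ e ≤ p ^ e := pow_le_pow_left₀ (by omega) (by omega) e
      nlinarith
    have hxx' : x'.toNat + e ≤ x.toNat := by
      have h1 : x'.toNat + e ≤ x'.toNat * 2 ^ e := pv_nat_add_le_mul_pow _ e (by omega)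
      have h2' : (x' * 2 ^ e : Int).toNat = x'.toNat * 2 ^ e := by
        rw [Int.toNat_mul (by omega) (by positivity),
          show ((2:Int)) = ((2:Nat):Int) from by norm_num, ← Nat.cast_pow, Int.toNat_natCast]
      omega
    have hx'x : x' < x := by
      have : (2:Int) ≤ 2 ^ e := by
        calc (2:Int) = 2 ^ 1 := by norm_num
        _ ≤ 2 ^ e := pow_le_pow_right₀ (by omega) (by omega)
      nlinarith
    have stepA : pvLoopA (f' + 1) x spf out = pvLoopA f' x' spf (out ++ [(p, (e : Int))]) := by
      simp only [pvLoopA, if_pos (by omega : 1 < x), hget, hdl]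
      norm_num
    have hfd : PySem.Int.floordiv x p = x' * p ^ (e - 1) := by
      rw [PySem.Int.floordiv_eq_ediv_of_pos (by omega), hxe,
        show x' * p ^ e = (x' * p ^ (e - 1)) * p by
          rw [mul_assoc, ← pow_succ]; congr 2; omega,
        Int.mul_ediv_cancel _ (by omega : p ≠ 0)]
    have hlen' : (x' * p ^ (e - 1) : Int) < spf.length := by
      have : x' * p ^ (e - 1) ≤ x := by
        rw [hxe]
        have : p ^ (e - 1) ≤ p ^ e := pow_le_pow_right₀ (by omega) (by omega)
        nlinarith
      omega
    have hmin' : ∀ q : Int, 2 ≤ q → q ∣ x' * p ^ (e - 1) → p ≤ q := by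
      intro q hq2 hqd
      refine hmin q hq2 (hqd.trans ⟨p, ?_⟩)
      rw [hxe, mul_assoc, ← pow_succ]
      congr 2; omega
    have stepB : pvLoopB (g' + 1) x spf (PySem.Dict.mk out) =
        pvLoopB (g' - (e - 1)) x' spf
          (PySem.Dict.mk (out ++ [(p, (1 : Int) + ((e - 1 : Nat) : Int))])) := by
      simp only [pvLoopB, if_pos (by omega : 1 < x), hget,
        pv_insert_fresh out p hout, hfd]
      exact pv_loopB_run hv hp2 (e - 1) g' x' out 1 hout hx'1 hnd (by omega) hlen' hmin'
    have hcast : ((1 : Int) + ((e - 1 : Nat) : Int)) = (e : Int) := by omega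
    rw [stepA, stepB, hcast]
    by_cases hx'2 : 2 ≤ x'
    · refine ih x'.toNat (by omega) x' f' (g' - (e - 1)) (out ++ [(p, (e : Int))]) rfl hx'2
        (by omega) (by omega) (by omega) ?_
      intro q hq d hd2 hdd
      have hdx : d ∣ x := hdd.trans ⟨p ^ e, hxe⟩
      rcases List.mem_append.mp hq with hq | hq
      · exact hlow q hq d hd2 hdx
      · obtain rfl : q = (p, (e : Int)) := by simpa using hq
        have hple : p ≤ d := hmin d hd2 hdx
        rcases lt_or_eq_of_le hple with h | h
        · exact h
        · exact absurd (h ▸ hdd) hnd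
    · rw [pv_loopA_stop _ _ _ _ (by omega), pv_loopB_stop _ _ _ _ (by omega)]

-- ===== VERDICT (by name: the statement is the Claim_ definition above) =====
theorem factorize_small_spec : Claim_equal_factorize_small := by
  intro x spf _ hpre
  unfold Spec_factorize_small factorize_small factorize_small_alt
  rcases hpre with hx1 | ⟨h2, hlen, hv⟩
  · rw [pv_loopA_stop _ _ _ _ hx1, pv_loopB_stop _ _ _ _ hx1]; rfl
  · have hemp : (PySem.Dict.empty : PySem.Dict Int Int) = PySem.Dict.mk [] := rfl
    rw [hemp]
    exact (pv_main hv x.toNat x (x.toNat + 1) (x.toNat + 1) [] rfl h2 hlen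
      (by omega) (by omega) (fun q hq => by simp at hq)).symm
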